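-- pv_equiv track=rewrite | github.com/Britoflavio/UTN-2024 | Trabajo-practico-3/funciones.py | opcion8
-- ===== SOURCE A (Python) =====
-- def ordenar_monto(vec):
--     n = len(vec)
--     for i in range(n - 1):
--         for j in range(i+1, n):
--             if vec[i] > vec[j]:
--                 vec[i], vec[j] = vec[j], vec[i]
--     return vec[-1]
--
-- def opcion8(vec):
--
--     n = len(vec)
--     monto_total = 0
--
--
--     ordenar_monto(vec)
--     monto_mayor = vec[-1]
--
--     for i in range(n-1):
--         monto_total += vec[i]
--     porc = (monto_mayor * 100) // monto_total
--     return porc, monto_mayor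
-- ===== SOURCE B (Python) =====
-- def opcion8(vec):
--     # Keeps A's observable side effect: vec ends up sorted ascending in place.
--     vec.sort()
--     monto_mayor = vec[-1]
--     monto_total = sum(vec[:-1])
--     porc = (monto_mayor * 100) // monto_total
--     return porc, monto_mayor
-- ===== Notes on version B (the rewrite author's own statement) =====
-- stated objective: faster
-- what changed: Replaces the hand-written O(n^2) nested-loop selection sort and the explicit index-summing loop with the builtin Timsort (vec.sort(), preserving the in-place mutation) plus vec[-1] and sum(vec[:-1]).
-- outside the precondition, e.g. on opcion8([]): A raises IndexError, B raises IndexError; on opcion8([-1]): A raises ZeroDivisionError, B raises ZeroDivisionError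
import Mathlib
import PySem

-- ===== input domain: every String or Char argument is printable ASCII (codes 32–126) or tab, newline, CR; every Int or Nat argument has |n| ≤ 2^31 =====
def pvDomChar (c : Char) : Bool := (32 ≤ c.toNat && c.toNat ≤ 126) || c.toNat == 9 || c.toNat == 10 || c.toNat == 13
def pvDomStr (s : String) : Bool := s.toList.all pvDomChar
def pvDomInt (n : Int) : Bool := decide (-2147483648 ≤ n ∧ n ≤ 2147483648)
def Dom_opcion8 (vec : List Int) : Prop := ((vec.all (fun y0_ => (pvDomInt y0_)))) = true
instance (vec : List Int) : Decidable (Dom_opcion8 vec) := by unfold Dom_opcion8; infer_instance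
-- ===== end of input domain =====

-- B replaces A's hand-written O(n^2) nested-loop sort and index-summing loop by the builtin sort
-- (keeping A's in-place mutation of vec, which is observable to the caller) plus vec[-1] and sum(vec[:-1]).

-- ===== PORT A =====
-- the inner loop body: 'if vec[i] > vec[j]: vec[i], vec[j] = vec[j], vec[i]'
def pvSwapStep (i : Int) (w : List Int) (j : Int) : List Int :=
  let vi := PySem.List.pyGetD w i 0
  let vj := PySem.List.pyGetD w j 0
  if vi > vj then PySem.List.pySetD (PySem.List.pySetD w i vj) j vi else w

-- 'for j in range(i+1, n): …'
def pvInner (n : Int) (v : List Int) (i : Int) : List Int :=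
  (PySem.List.pyRange (i + 1) n 1).foldl (pvSwapStep i) v

-- ordenar_monto(vec): the nested-loop in-place sort; its 'return vec[-1]' is discarded by opcion8
-- (it raises IndexError only on [], which Pre_ excludes)
def ordenarMonto (vec : List Int) : List Int :=
  let n : Int := vec.length
  (PySem.List.pyRange 0 (n - 1) 1).foldl (pvInner n) vec

def opcion8 (vec : List Int) : List Int :=
  let n : Int := vec.length
  let v := ordenarMonto vec
  let montoMayor := PySem.List.pyGetD v (-1) 0
  let montoTotal := (PySem.List.pyRange 0 (n - 1) 1).foldl (fun t i => t + PySem.List.pyGetD v i 0) 0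
  let porc := PySem.Int.floordiv (montoMayor * 100) montoTotal
  [porc, montoMayor]

-- ===== PORT B =====
def opcion8_alt (vec : List Int) : List Int :=
  let v := PySem.List.sorted vec (fun x => x) false
  let montoMayor := PySem.List.pyGetD v (-1) 0
  let montoTotal := (PySem.List.slice v none (some (-1))).sum
  let porc := PySem.Int.floordiv (montoMayor * 100) montoTotal
  [porc, montoMayor]

-- ===== PRECONDITION & SPEC =====
-- Pre_ excludes exactly the inputs where the Python A raises (and B raises identically):
-- [] (IndexError on vec[-1]) and lists whose elements other than one maximum sum to 0,
-- e.g. any singleton (ZeroDivisionError on the final division).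
def Pre_opcion8 (vec : List Int) : Prop :=
  2 ≤ vec.length ∧ vec.sum ≠ vec.max?.getD 0
instance (vec : List Int) : Decidable (Pre_opcion8 vec) := by unfold Pre_opcion8; infer_instance
def pvWitness_opcion8 : List Int := [1, 2]

def Spec_opcion8 (vec : List Int) (out : List Int) : Prop := out = opcion8_alt vec
instance (vec : List Int) (out : List Int) : Decidable (Spec_opcion8 vec out) := by unfold Spec_opcion8; infer_instance

-- ===== CLAIM (what is proved, stated in full; the proofs are below) =====
def Claim_equal_opcion8 : Prop := ∀ (vec : List Int), Dom_opcion8 vec → Pre_opcion8 vec → Spec_opcion8 vec (opcion8 vec)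

-- ===== LEMMAS AND PROOFS =====

-- structural description of one pass of A's inner loop: the minimum is selected into the front
-- slot, the displaced larger elements stay behind in order
def sel (x : Int) : List Int → Int × List Int
  | [] => (x, [])
  | y :: ys => let p := sel (min x y) ys; (p.1, max x y :: p.2)

lemma sel_length (x : Int) (ys : List Int) : (sel x ys).2.length = ys.length := by
  induction ys generalizing x with
  | nil => rfl
  | cons y ys ih => simp [sel, ih]

lemma sel_perm (x : Int) (ys : List Int) :
    List.Perm ((sel x ys).1 :: (sel x ys).2) (x :: ys) := by
  induction ys generalizing x with
  | nil => exact List.Perm.refl _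
  | cons y ys ih =>
    simp only [sel]
    have h1 : List.Perm ((sel (min x y) ys).1 :: max x y :: (sel (min x y) ys).2)
        (max x y :: (sel (min x y) ys).1 :: (sel (min x y) ys).2) := List.Perm.swap _ _ _
    have h2 := (ih (min x y)).cons (max x y)
    have h3 : List.Perm (max x y :: min x y :: ys) (x :: y :: ys) := by
      rcases le_total x y with h | h
      · rw [min_eq_left h, max_eq_right h]
        exact List.Perm.swap _ _ _
      · rw [min_eq_right h, max_eq_left h]
    exact (h1.trans h2).trans h3

lemma sel_min (x : Int) (ys : List Int) :
    (sel x ys).1 ≤ x ∧ ∀ z ∈ (sel x ys).2, (sel x ys).1 ≤ z := by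
  induction ys generalizing x with
  | nil => simp [sel]
  | cons y ys ih =>
    obtain ⟨h1, h2⟩ := ih (min x y)
    simp only [sel, List.mem_cons]
    refine ⟨le_trans h1 (min_le_left _ _), ?_⟩
    intro z hz
    rcases hz with rfl | hz
    · rcases le_total x y with h | h
      · rw [max_eq_right h]; exact le_trans h1 (le_trans (min_le_left _ _) h)
      · rw [max_eq_left h]; exact le_trans h1 (min_le_left _ _)
    · exact h2 z hz

-- fuel-indexed selection sort
def ssortF : Nat → List Int → List Int
  | 0, l => l
  | _ + 1, [] => []
  | f + 1, x :: xs => (sel x xs).1 :: ssortF f (sel x xs).2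

lemma ssortF_perm : ∀ (f : Nat) (l : List Int), l.length ≤ f → List.Perm (ssortF f l) l := by
  intro f
  induction f with
  | zero => intro l _; exact List.Perm.refl _
  | succ f ih =>
    intro l hl
    cases l with
    | nil => exact List.Perm.refl _
    | cons x xs =>
      simp only [ssortF]
      have hlen : (sel x xs).2.length ≤ f := by
        rw [sel_length]; simpa using Nat.lt_succ_iff.mp (Nat.lt_of_lt_of_le (by simp) hl)
      exact List.Perm.trans (List.Perm.cons _ (ih _ hlen)) (sel_perm x xs)

lemma ssortF_pairwise : ∀ (f : Nat) (l : List Int), l.length ≤ f →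
    (ssortF f l).Pairwise (· ≤ ·) := by
  intro f
  induction f with
  | zero =>
    intro l hl
    have : l = [] := List.length_eq_zero_iff.mp (Nat.le_zero.mp hl)
    subst this; simp [ssortF]
  | succ f ih =>
    intro l hl
    cases l with
    | nil => simp [ssortF]
    | cons x xs =>
      have hlen : (sel x xs).2.length ≤ f := by
        rw [sel_length]; simpa using Nat.lt_succ_iff.mp (Nat.lt_of_lt_of_le (by simp) hl)
      refine List.Pairwise.cons ?_ (ih _ hlen)
      intro z hz
      exact (sel_min x xs).2 z ((ssortF_perm f (sel x xs).2 hlen).mem_iff.mp hz)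

lemma sorted_eq_ssortF (l : List Int) :
    PySem.List.sorted l (fun x => x) false = ssortF l.length l :=
  PySem.List.sorted_id_eq_of_perm_of_pairwise l (ssortF l.length l)
    (ssortF_perm l.length l le_rfl) (ssortF_pairwise l.length l le_rfl)

-- list surgery at position |l1| of l1 ++ x :: l2
lemma pyGetD_at (l1 l2 : List Int) (x d i : Int) (h : i = (l1.length : Int)) :
    PySem.List.pyGetD (l1 ++ x :: l2) i d = x := by
  subst h; simp

lemma pySetD_at (l1 l2 : List Int) (x v i : Int) (h : i = (l1.length : Int)) :
    PySem.List.pySetD (l1 ++ x :: l2) i v = l1 ++ v :: l2 := by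
  subst h; simp

-- one full inner pass, j running from |pre|+1+|done| to the end of the list
lemma inner_spec : ∀ (todo done pre : List Int) (cur : Int) (a b : Int),
    a = (pre.length : Int) + 1 + done.length →
    b = a + todo.length →
    (PySem.List.pyRange a b 1).foldl (pvSwapStep (pre.length : Int)) (pre ++ cur :: (done ++ todo))
      = pre ++ (sel cur todo).1 :: (done ++ (sel cur todo).2) := by
  intro todo
  induction todo with
  | nil =>
    intro done pre cur a b ha hb
    rw [PySem.List.pyRange_one_eq_nil (by simp at hb; omega)]
    simp [sel]
  | cons y t ih =>
    intro done pre cur a b ha hb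
    simp only [List.length_cons] at hb
    rw [PySem.List.pyRange_one_cons (by omega)]
    simp only [List.foldl_cons]
    have hw : pre ++ cur :: (done ++ y :: t) = (pre ++ cur :: done) ++ y :: t := by simp
    have hstep : pvSwapStep (pre.length : Int) (pre ++ cur :: (done ++ y :: t)) a
        = pre ++ min cur y :: (done ++ max cur y :: t) := by
      unfold pvSwapStep
      have hgi : PySem.List.pyGetD (pre ++ cur :: (done ++ y :: t)) (pre.length : Int) 0 = cur :=
        pyGetD_at pre (done ++ y :: t) cur 0 _ rfl
      have hgj : PySem.List.pyGetD (pre ++ cur :: (done ++ y :: t)) a 0 = y := by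
        rw [hw]; exact pyGetD_at (pre ++ cur :: done) t y 0 a (by simp; omega)
      rw [hgi, hgj]
      by_cases h : cur > y
      · simp only [if_pos h]
        rw [pySetD_at pre (done ++ y :: t) cur y _ rfl]
        have h2 : pre ++ y :: (done ++ y :: t) = (pre ++ y :: done) ++ y :: t := by simp
        rw [h2, pySetD_at (pre ++ y :: done) t y cur a (by simp; omega)]
        have hmin : min cur y = y := by omega
        have hmax : max cur y = cur := by omega
        rw [hmin, hmax]; simp
      · simp only [if_neg h]
        have hmin : min cur y = cur := by omega
        have hmax : max cur y = y := by omega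
        rw [hmin, hmax]
    rw [hstep]
    have hre : pre ++ min cur y :: (done ++ max cur y :: t)
        = pre ++ min cur y :: ((done ++ [max cur y]) ++ t) := by simp
    rw [hre, ih (done ++ [max cur y]) pre (min cur y) (a + 1) b (by simp; omega) (by omega)]
    simp [sel]

-- the outer loop sorts the unsorted suffix by repeated selection
lemma outer_spec : ∀ (k : Nat) (todo done : List Int) (n : Int),
    todo.length ≤ k →
    n = (done.length : Int) + todo.length →
    (PySem.List.pyRange (done.length : Int) (n - 1) 1).foldl (pvInner n) (done ++ todo)
      = done ++ ssortF todo.length todo := by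
  intro k
  induction k with
  | zero =>
    intro todo done n h hn
    have : todo = [] := List.length_eq_zero_iff.mp (Nat.le_zero.mp h)
    subst this
    simp only [List.length_nil, Nat.cast_zero, add_zero] at hn
    rw [PySem.List.pyRange_one_eq_nil (by omega)]
    simp [ssortF]
  | succ k ih =>
    intro todo done n h hn
    cases todo with
    | nil =>
      simp only [List.length_nil, Nat.cast_zero, add_zero] at hn
      rw [PySem.List.pyRange_one_eq_nil (by omega)]
      simp [ssortF]
    | cons x t =>
      cases t with
      | nil =>
        simp only [List.length_cons, List.length_nil] at hn
        rw [PySem.List.pyRange_one_eq_nil (by simp at hn; omega)]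
        simp [ssortF, sel]
      | cons y t2 =>
        simp only [List.length_cons] at hn h
        have hn' : n = (done.length : Int) + t2.length + 2 := by push_cast at hn; omega
        rw [PySem.List.pyRange_one_cons (by omega)]
        simp only [List.foldl_cons]
        have hstep : pvInner n (done ++ x :: y :: t2) (done.length : Int)
            = done ++ (sel x (y :: t2)).1 :: (sel x (y :: t2)).2 := by
          unfold pvInner
          have := inner_spec (y :: t2) [] done x ((done.length : Int) + 1) n
            (by simp) (by simp only [List.length_cons]; push_cast; omega)
          simpa using this
        rw [hstep]
        have hre : done ++ (sel x (y :: t2)).1 :: (sel x (y :: t2)).2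
            = (done ++ [(sel x (y :: t2)).1]) ++ (sel x (y :: t2)).2 := by simp
        rw [hre]
        have hlen2 : (sel x (y :: t2)).2.length = t2.length + 1 := by
          simp [sel_length]
        have harg : ((done.length : Int) + 1) = (((done ++ [(sel x (y :: t2)).1]).length : Nat) : Int) := by
          simp
        rw [harg, ih ((sel x (y :: t2)).2) (done ++ [(sel x (y :: t2)).1]) n
          (by omega) (by simp only [hlen2, List.length_append, List.length_singleton]; push_cast; omega)]
        simp [ssortF, hlen2]

lemma ordenarMonto_eq_sorted (vec : List Int) :
    ordenarMonto vec = PySem.List.sorted vec (fun x => x) false := by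
  unfold ordenarMonto
  rw [sorted_eq_ssortF]
  have h := outer_spec vec.length vec [] (vec.length : Int) le_rfl (by simp)
  simp at h
  exact h

-- A's summing loop over range(n-1) is the sum of all but the last element of v
lemma sum_loop_eq (v : List Int) (hv : v ≠ []) :
    (PySem.List.pyRange 0 ((v.length : Int) - 1) 1).foldl
        (fun t i => t + PySem.List.pyGetD v i 0) 0
      = v.dropLast.sum := by
  have hpos : 1 ≤ v.length := List.length_pos_iff.mpr hv
  have hlen : ((v.length : Int) - 1) = ((v.dropLast.length : Nat) : Int) := by
    simp [List.length_dropLast]; omega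
  rw [hlen]
  rw [PySem.List.foldl_congr_mem _ _ (fun t i => t + PySem.List.pyGetD v.dropLast i 0) _ ?_]
  · rw [PySem.List.foldl_pyRange_zero_pyGetD' v.dropLast 0 (fun t x => t + x) 0]
    rw [List.sum_eq_foldl]
  · intro acc i hi
    rw [PySem.List.mem_pyRange_one] at hi
    have hilt : i < ((v.dropLast.length : Nat) : Int) := hi.2
    have h1 : PySem.List.pyGetD v i 0 = PySem.List.pyGetD v.dropLast i 0 := by
      rw [PySem.List.pyGetD_eq_getElem v 0 hi.1 (by simp [List.length_dropLast] at hilt ⊢; omega),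
        PySem.List.pyGetD_eq_getElem v.dropLast 0 hi.1 (by simpa using hilt)]
      exact (List.getElem_dropLast _).symm
    rw [h1]

lemma sorted_ne_nil (vec : List Int) (h : vec ≠ []) :
    PySem.List.sorted vec (fun x => x) false ≠ [] := by
  intro hc
  have := PySem.List.length_sorted vec (fun x => x) false
  rw [hc] at this
  exact h (List.length_eq_zero_iff.mp this.symm)

-- ===== VERDICT (by name: the statement is the Claim_ definition above) =====
theorem opcion8_spec : Claim_equal_opcion8 := by
  intro vec _ hpre
  unfold Spec_opcion8 opcion8 opcion8_alt
  have hne : vec ≠ [] := by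
    intro h; subst h; simp [Pre_opcion8] at hpre
  simp only [ordenarMonto_eq_sorted, PySem.List.slice_to_neg_one]
  have hsum : (PySem.List.pyRange 0 ((vec.length : Int) - 1) 1).foldl
      (fun t i => t + PySem.List.pyGetD (PySem.List.sorted vec (fun x => x) false) i 0) 0
      = (PySem.List.sorted vec (fun x => x) false).dropLast.sum := by
    have h := sum_loop_eq (PySem.List.sorted vec (fun x => x) false) (sorted_ne_nil vec hne)
    rwa [PySem.List.length_sorted] at h
  simp only [hsum]
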